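-- pv_equiv track=rewrite | github.com/AbsarAhmedBhutta/27-2023TEST | q5.py | solution
-- ===== SOURCE A (Python) =====
-- def solution(s):
--     result = ""
--     for c in s:
--         if c.islower():
--             result += chr(ord('z') - ord(c) + ord('a'))
--         else:
--             result += c
--     return result
-- ===== SOURCE B (Python) =====
-- _TABLE = str.maketrans('abcdefghijklmnopqrstuvwxyz', 'zyxwvutsrqponmlkjihgfedcba')
--
-- def solution(s):
--     return s.translate(_TABLE)
-- ===== Notes on version B (the rewrite author's own statement) =====
-- stated objective: faster
-- what changed: B precomputes a 26-entry translation table once and returns s.translate(table) in a single table-driven pass, instead of A's per-character branch with mirror arithmetic and repeated string concatenation.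
import Mathlib
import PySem

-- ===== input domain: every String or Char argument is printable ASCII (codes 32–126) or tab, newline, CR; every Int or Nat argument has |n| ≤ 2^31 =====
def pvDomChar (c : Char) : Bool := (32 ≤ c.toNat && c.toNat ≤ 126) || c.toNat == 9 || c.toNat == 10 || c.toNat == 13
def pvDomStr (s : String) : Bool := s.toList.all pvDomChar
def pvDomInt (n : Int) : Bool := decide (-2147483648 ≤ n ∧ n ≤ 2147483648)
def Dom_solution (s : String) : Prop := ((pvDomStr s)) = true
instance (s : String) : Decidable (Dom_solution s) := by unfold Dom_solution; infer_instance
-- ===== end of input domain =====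

-- ===== PORT A =====
-- B precomputes the mirror translation table once and maps it over the string; A loops with per-char arithmetic and concatenation.
def solution (s : String) : String :=
  String.mk (s.toList.foldl
    (fun result c =>
      result ++ (if PySem.Chars.islower c then [Char.ofNat (122 - c.toNat + 97)] else [c]))
    [])

-- ===== PORT B =====
-- str.maketrans('abc…z', 'zyx…a') as an insertion-ordered dict; translate = single table-driven pass (absent keys unchanged)
def mirrorTable : PySem.Dict Char Char :=
  PySem.Dict.ofList ("abcdefghijklmnopqrstuvwxyz".toList.zip "zyxwvutsrqponmlkjihgfedcba".toList)

def solution_alt (s : String) : String :=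
  String.mk (s.toList.map (fun c => mirrorTable.getD c c))

-- ===== PRECONDITION & SPEC =====
def Spec_solution (s : String) (out : String) : Prop := out = solution_alt s
instance (s : String) (out : String) : Decidable (Spec_solution s out) := by unfold Spec_solution; infer_instance

-- ===== CLAIM (what is proved, stated in full; the proofs are below) =====
def Claim_equal_solution : Prop := ∀ (s : String), Dom_solution s → Spec_solution s (solution s)

-- ===== LEMMAS AND PROOFS =====

set_option maxRecDepth 4000 in
theorem perChar_fin : ∀ (n : Fin 127),
    (if PySem.Chars.islower (Char.ofNat n.val) then
        [Char.ofNat (122 - (Char.ofNat n.val).toNat + 97)]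
      else [Char.ofNat n.val])
      = [mirrorTable.getD (Char.ofNat n.val) (Char.ofNat n.val)] := by decide

theorem perChar (c : Char) (h : c.toNat < 127) :
    (if PySem.Chars.islower c then [Char.ofNat (122 - c.toNat + 97)] else [c])
      = [mirrorTable.getD c c] := by
  have := perChar_fin ⟨c.toNat, h⟩
  simpa [Char.ofNat_toNat] using this

theorem loop_eq (cs : List Char) (acc : List Char) (h : ∀ c ∈ cs, c.toNat < 127) :
    cs.foldl
      (fun result c =>
        result ++ (if PySem.Chars.islower c then [Char.ofNat (122 - c.toNat + 97)] else [c]))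
      acc
      = acc ++ cs.map (fun c => mirrorTable.getD c c) := by
  induction cs generalizing acc with
  | nil => simp
  | cons c cs ih =>
    simp only [List.foldl_cons, List.map_cons]
    rw [ih _ (fun d hd => h d (List.mem_cons_of_mem _ hd)),
        perChar c (h c (List.mem_cons_self ..))]
    simp

-- ===== VERDICT (by name: the statement is the Claim_ definition above) =====
theorem solution_spec : Claim_equal_solution := by
  intro s hdom
  unfold Spec_solution solution solution_alt
  congr 1
  have h : ∀ c ∈ s.toList, c.toNat < 127 := by
    intro c hc
    have := (List.all_eq_true.mp hdom) c hc
    simp only [pvDomChar, Bool.or_eq_true, Bool.and_eq_true, decide_eq_true_eq, beq_iff_eq] at this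
    omega
  simpa using loop_eq s.toList [] h
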